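-- pv_equiv track=rewrite | github.com/LuoUndergradXJTU/TwiBot-22 | src/crawler/UserExpand.py | sample_from_numerical_data_difference
-- ===== SOURCE A (Python) =====
-- def sample_from_numerical_data_difference(data, value, radius_k):
--     data.sort(key=lambda x: x[1])
--     loc_index = 0
--     if value <= data[0][1]:
--         loc_index = 0
--     elif value > data[-1][1]:
--         loc_index = len(data) - 1
--     else:
--         for index in range(len(data)-1):
--             if data[index][1] < value <= data[index+1][1]:
--                 loc_index = index
--                 break
--     loc_index = len(data) - loc_index - 1
--     loc_l = max(0, loc_index - radius_k)
--     loc_r = min(len(data), loc_index + radius_k)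
--     sample_data = data[loc_l:loc_r]
--     return [item[0] for item in sample_data]
-- ===== SOURCE B (Python) =====
-- def sample_from_numerical_data_difference(data, value, radius_k):
--     data.sort(key=lambda x: x[1])
--     n = len(data)
--     # binary search: lo becomes the bisect-left insertion point of value among the keys
--     lo, hi = 0, n
--     while lo < hi:
--         mid = (lo + hi) // 2
--         if data[mid][1] < value:
--             lo = mid + 1
--         else:
--             hi = mid
--     loc_index = n - min(n - 1, max(0, lo - 1)) - 1
--     loc_l = max(0, loc_index - radius_k)
--     loc_r = min(n, loc_index + radius_k)
--     return [item[0] for item in data[loc_l:loc_r]]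
-- ===== Notes on version B (the rewrite author's own statement) =====
-- stated objective: alternative
-- what changed: A's if/elif plus linear scan for the rank interval of value is replaced by a hand-written binary search (bisect-left) over the sorted keys followed by a single clamp; the sort and the slicing tail are unchanged.
import Mathlib
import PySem

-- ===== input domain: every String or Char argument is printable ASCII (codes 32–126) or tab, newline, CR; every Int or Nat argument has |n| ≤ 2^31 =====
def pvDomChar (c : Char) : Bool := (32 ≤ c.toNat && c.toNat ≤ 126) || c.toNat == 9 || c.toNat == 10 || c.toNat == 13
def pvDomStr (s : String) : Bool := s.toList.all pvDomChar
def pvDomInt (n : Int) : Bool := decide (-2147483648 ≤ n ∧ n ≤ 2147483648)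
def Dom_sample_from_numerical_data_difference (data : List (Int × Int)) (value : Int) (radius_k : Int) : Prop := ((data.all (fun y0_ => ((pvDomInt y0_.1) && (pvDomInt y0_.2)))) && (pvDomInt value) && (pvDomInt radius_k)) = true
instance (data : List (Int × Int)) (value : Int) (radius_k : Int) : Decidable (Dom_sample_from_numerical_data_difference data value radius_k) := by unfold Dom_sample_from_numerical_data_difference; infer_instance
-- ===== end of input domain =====

-- B replaces A's branchy linear scan for the rank of `value` by a hand-written binary search
-- over the sorted keys (same sort, same slicing tail); equivalence is about the RETURN value
-- only — both Pythons sort `data` in place.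

-- ===== PORT A =====
-- the `for index in range(len(data)-1): … break` loop of A (loc_index starts at 0)
def pvAScan (d : List (Int × Int)) (value : Int) : List Nat → Int
  | [] => 0
  | i :: is =>
    if (d.getD i (0, 0)).2 < value ∧ value ≤ (d.getD (i + 1) (0, 0)).2 then (i : Int)
    else pvAScan d value is

-- the if/elif/else computation of loc_index before the reversal line
def pvAIndex (d : List (Int × Int)) (value : Int) : Int :=
  if value ≤ (d.getD 0 (0, 0)).2 then 0
  else if value > (d.getD (d.length - 1) (0, 0)).2 then (d.length : Int) - 1
  else pvAScan d value (List.range (d.length - 1))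

def sample_from_numerical_data_difference (data : List (Int × Int)) (value : Int) (radius_k : Int) : List Int :=
  let d := PySem.List.sorted data (fun x => x.2)
  let n : Int := d.length
  let loc_index := n - pvAIndex d value - 1
  let loc_l := max 0 (loc_index - radius_k)
  let loc_r := min n (loc_index + radius_k)
  (PySem.List.slice d (some loc_l) (some loc_r)).map (fun item => item.1)

-- ===== PORT B =====
-- Source B's while-loop binary search for the insertion point of value among the keys
-- (structural recursion on the fuel `hi - lo`, an upper bound on the loop's iteration count)
def pvBSearchGo (d : List (Int × Int)) (value : Int) : Nat → Nat → Nat → Nat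
  | 0, lo, _hi => lo
  | fuel + 1, lo, hi =>
    if lo < hi then
      let mid := (lo + hi) / 2
      if (d.getD mid (0, 0)).2 < value then pvBSearchGo d value fuel (mid + 1) hi
      else pvBSearchGo d value fuel lo mid
    else lo

def pvBSearch (d : List (Int × Int)) (value : Int) (lo hi : Nat) : Nat :=
  pvBSearchGo d value (hi - lo) lo hi

def pvBIndex (d : List (Int × Int)) (value : Int) : Int :=
  min ((d.length : Int) - 1) (max 0 ((pvBSearch d value 0 d.length : Int) - 1))

def sample_from_numerical_data_difference_alt (data : List (Int × Int)) (value : Int) (radius_k : Int) : List Int :=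
  let d := PySem.List.sorted data (fun x => x.2)
  let n : Int := d.length
  let loc_index := n - pvBIndex d value - 1
  let loc_l := max 0 (loc_index - radius_k)
  let loc_r := min n (loc_index + radius_k)
  (PySem.List.slice d (some loc_l) (some loc_r)).map (fun item => item.1)

-- ===== PRECONDITION & SPEC =====
-- Pre_ excludes only the empty list, on which A raises IndexError at data[0].
def Pre_sample_from_numerical_data_difference (data : List (Int × Int)) (value : Int) (radius_k : Int) : Prop := data ≠ []
instance (data : List (Int × Int)) (value : Int) (radius_k : Int) : Decidable (Pre_sample_from_numerical_data_difference data value radius_k) := by unfold Pre_sample_from_numerical_data_difference; infer_instance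
def pvWitness_sample_from_numerical_data_difference : (List (Int × Int)) × Int × Int := ([(1, 2), (3, 4)], 3, 1)

def Spec_sample_from_numerical_data_difference (data : List (Int × Int)) (value : Int) (radius_k : Int) (out : List Int) : Prop := out = sample_from_numerical_data_difference_alt data value radius_k
instance (data : List (Int × Int)) (value : Int) (radius_k : Int) (out : List Int) : Decidable (Spec_sample_from_numerical_data_difference data value radius_k out) := by unfold Spec_sample_from_numerical_data_difference; infer_instance

-- ===== CLAIM (what is proved, stated in full; the proofs are below) =====
def Claim_equal_sample_from_numerical_data_difference : Prop := ∀ (data : List (Int × Int)) (value : Int) (radius_k : Int), Dom_sample_from_numerical_data_difference data value radius_k → Pre_sample_from_numerical_data_difference data value radius_k → Spec_sample_from_numerical_data_difference data value radius_k (sample_from_numerical_data_difference data value radius_k)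

-- ===== LEMMAS AND PROOFS =====

-- number of entries of d whose key is < value (the bisect-left insertion point in a sorted d)
def pvCnt (d : List (Int × Int)) (value : Int) : Nat := d.countP (fun x => decide (x.2 < value))

lemma pvCnt_le_length (d : List (Int × Int)) (value : Int) : pvCnt d value ≤ d.length :=
  List.countP_le_length

-- characterization of pvCnt on a key-sorted list
lemma pvChar (d : List (Int × Int)) (value : Int)
    (hp : d.Pairwise (fun a b => a.2 ≤ b.2)) :
    ∀ i, i < d.length → ((d.getD i (0, 0)).2 < value ↔ i < pvCnt d value) := by
  induction d with
  | nil => intro i hi; simp at hi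
  | cons x xs ih =>
    rcases List.pairwise_cons.mp hp with ⟨hx, hp'⟩
    intro i hi
    have hcnt : pvCnt (x :: xs) value
        = pvCnt xs value + (if x.2 < value then 1 else 0) := by
      simp [pvCnt, List.countP_cons]
    cases i with
    | zero =>
      simp only [List.getD_cons_zero, hcnt]
      constructor
      · intro h; rw [if_pos h]; omega
      · intro h
        by_cases hxv : x.2 < value
        · exact hxv
        · exfalso
          rw [if_neg hxv] at h
          have hpos : 0 < xs.countP (fun x => decide (x.2 < value)) := by
            have : pvCnt xs value ≠ 0 := by omega
            simpa [pvCnt] using Nat.pos_of_ne_zero this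
          rcases List.countP_pos_iff.mp hpos with ⟨y, hy, hyv⟩
          exact hxv (lt_of_le_of_lt (hx y hy) (by simpa using hyv))
    | succ j =>
      have hj : j < xs.length := by simpa using hi
      have := ih hp' j hj
      simp only [List.getD_cons_succ, hcnt]
      by_cases hxv : x.2 < value
      · rw [if_pos hxv, this]; omega
      · have hzero : pvCnt xs value = 0 := by
          rw [pvCnt, List.countP_eq_zero]
          intro y hy
          simp only [decide_eq_true_eq]
          exact fun h => hxv (lt_of_le_of_lt (hx y hy) h)
        have hmem : xs.getD j (0, 0) ∈ xs := by
          rw [List.getD_eq_getElem xs (0,0) hj]; exact List.getElem_mem hj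
        rw [if_neg hxv, hzero]
        constructor
        · intro h
          exact absurd (lt_of_le_of_lt (hx _ hmem) h) hxv
        · intro h; omega

lemma pvBSearchGo_eq (d : List (Int × Int)) (value : Int)
    (hp : d.Pairwise (fun a b => a.2 ≤ b.2)) :
    ∀ (fuel lo hi : Nat), hi - lo ≤ fuel → hi ≤ d.length →
      lo ≤ pvCnt d value → pvCnt d value ≤ hi →
      pvBSearchGo d value fuel lo hi = pvCnt d value := by
  intro fuel
  induction fuel with
  | zero => intro lo hi hf hhi hlo hcnt; simp only [pvBSearchGo]; omega
  | succ fuel ih =>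
    intro lo hi hf hhi hlo hcnt
    simp only [pvBSearchGo]
    split_ifs with hlt hmidv
    · have hm : (lo + hi) / 2 < d.length := by omega
      have := (pvChar d value hp _ hm).mp hmidv
      exact ih _ _ (by omega) hhi (by omega) hcnt
    · have hm : (lo + hi) / 2 < d.length := by omega
      have : ¬ (lo + hi) / 2 < pvCnt d value := fun h =>
        hmidv ((pvChar d value hp _ hm).mpr h)
      exact ih _ _ (by omega) (by omega) hlo (by omega)
    · omega

lemma pvBSearch_eq (d : List (Int × Int)) (value : Int)
    (hp : d.Pairwise (fun a b => a.2 ≤ b.2)) :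
    pvBSearch d value 0 d.length = pvCnt d value :=
  pvBSearchGo_eq d value hp _ 0 d.length (by omega) le_rfl (Nat.zero_le _)
    (pvCnt_le_length d value)

lemma pvAScan_eq (d : List (Int × Int)) (value : Int) (t : Nat) :
    ∀ l : List Nat, t ∈ l →
      (∀ j ∈ l, (((d.getD j (0, 0)).2 < value ∧ value ≤ (d.getD (j + 1) (0, 0)).2) ↔ j = t)) →
      pvAScan d value l = (t : Int) := by
  intro l
  induction l with
  | nil => intro h; simp at h
  | cons j js ih =>
    intro hmem hcond
    rw [pvAScan]
    split_ifs with h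
    · have := (hcond j (by simp)).mp h
      simp [this]
    · have hjt : j ≠ t := fun he => h ((hcond j (by simp)).mpr he)
      have : t ∈ js := by
        rcases List.mem_cons.mp hmem with h' | h'
        · exact absurd h'.symm hjt
        · exact h'
      exact ih this (fun k hk => hcond k (List.mem_cons_of_mem _ hk))

-- the two index computations agree on a nonempty key-sorted list
lemma pvIndex_eq (d : List (Int × Int)) (value : Int)
    (hp : d.Pairwise (fun a b => a.2 ≤ b.2)) (hne : d ≠ []) :
    pvAIndex d value = pvBIndex d value := by
  have hlen : 0 < d.length := List.length_pos_iff.mpr hne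
  have hbs : pvBSearch d value 0 d.length = pvCnt d value :=
    pvBSearch_eq d value hp
  have hchar := pvChar d value hp
  rw [pvAIndex, pvBIndex, hbs]
  split_ifs with h0 hl
  · -- value ≤ key[0] : cnt = 0
    have : ¬ (d.getD 0 (0, 0)).2 < value := not_lt.mpr h0
    have hc : ¬ 0 < pvCnt d value := fun hc => this ((hchar 0 hlen).mpr hc)
    have : pvCnt d value = 0 := by omega
    rw [this]; omega
  · -- value > key[len-1] : cnt = len
    have hlast : d.length - 1 < d.length := by omega
    have : d.length - 1 < pvCnt d value := (hchar _ hlast).mp hl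
    have hc : pvCnt d value = d.length := by
      have := pvCnt_le_length d value; omega
    rw [hc]; omega
  · -- middle: key[0] < value ≤ key[len-1]
    have h0' : (d.getD 0 (0, 0)).2 < value := lt_of_not_ge h0
    have hlast : d.length - 1 < d.length := by omega
    have hcpos : 0 < pvCnt d value := (hchar 0 hlen).mp h0'
    have hlv : ¬ (d.getD (d.length - 1) (0, 0)).2 < value := not_lt.mpr (le_of_not_gt hl)
    have hcub : ¬ d.length - 1 < pvCnt d value := fun hc => hlv ((hchar _ hlast).mpr hc)
    have hcle : pvCnt d value ≤ d.length - 1 := by omega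
    have hn2 : 2 ≤ d.length := by omega
    set c := pvCnt d value with hc
    have hscan : pvAScan d value (List.range (d.length - 1)) = ((c - 1 : Nat) : Int) := by
      apply pvAScan_eq
      · rw [List.mem_range]; omega
      · intro j hj
        rw [List.mem_range] at hj
        have hj1 : j < d.length := by omega
        have hj2 : j + 1 < d.length := by omega
        rw [hchar j hj1]
        constructor
        · rintro ⟨hja, hjb⟩
          have : ¬ (d.getD (j + 1) (0, 0)).2 < value := not_lt.mpr hjb
          have : ¬ j + 1 < c := fun hcc => this ((hchar _ hj2).mpr hcc)
          omega
        · intro he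
          subst he
          refine ⟨by omega, ?_⟩
          by_contra hcon
          have := (hchar _ hj2).mp (lt_of_not_ge hcon)
          omega
    rw [hscan]; omega

-- ===== VERDICT (by name: the statement is the Claim_ definition above) =====
theorem sample_from_numerical_data_difference_spec : Claim_equal_sample_from_numerical_data_difference := by
  intro data value radius_k _ hpre
  unfold Spec_sample_from_numerical_data_difference
  have hp := PySem.List.sorted_pairwise data (fun x => x.2)
  have hne : PySem.List.sorted data (fun x => x.2) ≠ [] := by
    rw [Ne, PySem.List.sorted_eq_nil_iff]; exact hpre
  simp only [sample_from_numerical_data_difference, sample_from_numerical_data_difference_alt,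
    pvIndex_eq _ value hp hne]
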